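-- pv_equiv track=rewrite | github.com/doocs/leetcode | solution/2300-2399/2380.Time Needed to Rearrange a Binary String/Solution.py | secondsToRemoveOccurrences
-- ===== SOURCE A (Python) =====
-- def secondsToRemoveOccurrences(s: str) -> int:
--     ans = cnt = 0
--     for c in s:
--         if c == '0':
--             cnt += 1
--         elif cnt:
--             ans = max(ans + 1, cnt)
--     return ans
-- ===== SOURCE B (Python) =====
-- def secondsToRemoveOccurrences(s: str) -> int:
--     # closed form: answer = max over non-'0' chars preceded by a zero of
--     # (zeros before it) + (non-'0' chars after it)
--     rest = sum(c != '0' for c in s)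
--     best = zeros = 0
--     for c in s:
--         if c == '0':
--             zeros += 1
--         else:
--             rest -= 1
--             if zeros:
--                 best = max(best, zeros + rest)
--     return best
-- ===== Notes on version B (the rewrite author's own statement) =====
-- stated objective: alternative
-- what changed: Replaces A's self-referential recurrence ans = max(ans+1,cnt) by a closed form: precompute the total count of non-zero-digit characters, then take the max over each non-zero-digit character preceded by a zero of (zeros before it) plus (non-zero-digit characters after it).
import Mathlib
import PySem

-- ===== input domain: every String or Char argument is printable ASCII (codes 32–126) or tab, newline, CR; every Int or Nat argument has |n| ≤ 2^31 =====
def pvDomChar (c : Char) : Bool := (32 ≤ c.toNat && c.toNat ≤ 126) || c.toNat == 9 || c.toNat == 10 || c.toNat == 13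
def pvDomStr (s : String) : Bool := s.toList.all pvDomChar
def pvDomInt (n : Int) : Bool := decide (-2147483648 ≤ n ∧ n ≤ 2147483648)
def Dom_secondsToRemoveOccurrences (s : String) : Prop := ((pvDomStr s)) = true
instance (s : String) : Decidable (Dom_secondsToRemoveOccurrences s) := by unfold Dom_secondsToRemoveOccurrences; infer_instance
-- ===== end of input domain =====

-- B replaces A's running recurrence ans = max(ans+1, cnt) by a closed form:
-- max over each non-'0' char preceded by a zero of zerosBefore + nonZerosAfter (alternative decomposition, same cost).

-- ===== PORT A =====
-- state p = (ans, cnt)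
def pvStepA (p : Int × Int) (c : Char) : Int × Int :=
  if c = '0' then (p.1, p.2 + 1)
  else if p.2 ≠ 0 then (max (p.1 + 1) p.2, p.2)
  else p

def secondsToRemoveOccurrences (s : String) : Int :=
  (s.toList.foldl pvStepA (0, 0)).1

-- ===== PORT B =====
-- rest = sum(c != '0' for c in s)
def pvNZ (l : List Char) : Int :=
  (l.map (fun c => if c ≠ '0' then (1 : Int) else 0)).sum

-- state p = (best, zeros, rest)
def pvStepB (p : Int × Int × Int) (c : Char) : Int × Int × Int :=
  if c = '0' then (p.1, p.2.1 + 1, p.2.2)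
  else if p.2.1 ≠ 0 then (max p.1 (p.2.1 + (p.2.2 - 1)), p.2.1, p.2.2 - 1)
  else (p.1, p.2.1, p.2.2 - 1)

def secondsToRemoveOccurrences_alt (s : String) : Int :=
  (s.toList.foldl pvStepB (0, 0, pvNZ s.toList)).1

-- ===== PRECONDITION & SPEC =====
def Spec_secondsToRemoveOccurrences (s : String) (out : Int) : Prop := out = secondsToRemoveOccurrences_alt s
instance (s : String) (out : Int) : Decidable (Spec_secondsToRemoveOccurrences s out) := by unfold Spec_secondsToRemoveOccurrences; infer_instance

-- ===== CLAIM (what is proved, stated in full; the proofs are below) =====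
def Claim_equal_secondsToRemoveOccurrences : Prop := ∀ (s : String), Dom_secondsToRemoveOccurrences s → Spec_secondsToRemoveOccurrences s (secondsToRemoveOccurrences s)

-- ===== LEMMAS AND PROOFS =====

theorem pvNZ_nil : pvNZ [] = 0 := rfl

theorem pvNZ_cons (c : Char) (l : List Char) :
    pvNZ (c :: l) = (if c ≠ '0' then (1 : Int) else 0) + pvNZ l := by
  simp [pvNZ]

theorem pvNZ_nonneg (l : List Char) : 0 ≤ pvNZ l := by
  induction l with
  | nil => simp [pvNZ]
  | cons c l ih => rw [pvNZ_cons]; split <;> omega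

-- B's best only grows
theorem pvB_ge (l : List Char) : ∀ (b z r : Int), b ≤ (l.foldl pvStepB (b, z, r)).1 := by
  induction l with
  | nil => intro b z r; simp
  | cons c l ih =>
    intro b z r
    simp only [List.foldl_cons, pvStepB]
    split
    · exact ih b (z + 1) r
    · split
      · exact le_trans (le_max_left _ _) (ih _ z (r - 1))
      · exact ih b z (r - 1)

-- phase-2 invariant: once cnt ≥ 1, A's fold equals max (a + nz l) (B's fold)
theorem pvPhase2 (l : List Char) : ∀ (a b z : Int), 1 ≤ z → 0 ≤ b → b ≤ a + pvNZ l →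
    (l.foldl pvStepA (a, z)).1 = max (a + pvNZ l) (l.foldl pvStepB (b, z, pvNZ l)).1 := by
  induction l with
  | nil =>
    intro a b z _ _ hba
    simp only [List.foldl_nil, pvNZ_nil] at *
    omega
  | cons c l ih =>
    intro a b z hz hb hba
    rw [pvNZ_cons] at hba ⊢
    by_cases hc : c = '0'
    · simp only [List.foldl_cons, pvStepA, pvStepB, hc, if_true, if_neg (by simp : ¬('0' ≠ '0')), zero_add] at *
      rw [ih a b (z + 1) (by omega) hb (by omega)]
    · have hcz : (c = '0') = False := by simp [hc]
      simp only [List.foldl_cons, pvStepA, pvStepB, hcz, if_false,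
        if_pos (show z ≠ 0 by omega), if_pos hc] at *
      set r := pvNZ l with hr
      have hrnn := pvNZ_nonneg l
      -- A's new state: (max (a+1) z, z); B's new state: (max b (z + r), z, r)
      have hstep : (1 + r - 1) = r := by omega
      have hB : ((max b (z + ((1 + r) - 1)), z, (1 + r) - 1) : Int × Int × Int)
          = (max b (z + r), z, r) := by
        rw [hstep]
      rw [hB]
      have ihh := ih (max (a + 1) z) (max b (z + r)) z hz (by omega) (by omega)
      rw [ihh]
      have hX := pvB_ge l (max b (z + r)) z r
      set X := (l.foldl pvStepB (max b (z + r), z, r)).1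
      omega

-- phase-2 lower bound: B's result dominates nz l once cnt ≥ 1
theorem pvPhase2_lb (l : List Char) : ∀ (b z : Int), 1 ≤ z → 0 ≤ b →
    pvNZ l ≤ (l.foldl pvStepB (b, z, pvNZ l)).1 := by
  induction l with
  | nil => intro b z _ hb; simpa [pvNZ_nil] using hb
  | cons c l ih =>
    intro b z hz hb
    rw [pvNZ_cons]
    by_cases hc : c = '0'
    · simp only [List.foldl_cons, pvStepB, hc, if_true, if_neg (by simp : ¬('0' ≠ '0')), zero_add]
      simpa using ih b (z + 1) (by omega) hb
    · simp only [List.foldl_cons, pvStepB, if_neg hc, if_pos (show z ≠ 0 by omega), if_pos hc]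
      set r := pvNZ l with hr
      have hstep : (1 + r - 1) = r := by omega
      rw [hstep]
      have := pvB_ge l (max b (z + r)) z r
      omega

-- main: from the all-zero start, A = B on the list side
theorem pvMain (l : List Char) :
    (l.foldl pvStepA (0, 0)).1 = (l.foldl pvStepB (0, 0, pvNZ l)).1 := by
  induction l with
  | nil => rfl
  | cons c l ih =>
    by_cases hc : c = '0'
    · simp only [List.foldl_cons, pvStepA, pvStepB, hc, if_true,
        if_neg (by simp : ¬('0' ≠ '0')), pvNZ_cons, zero_add]
      have h2 := pvPhase2 l 0 0 1 (by omega) (by omega) (by have := pvNZ_nonneg l; omega)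
      have hlb := pvPhase2_lb l 0 1 (by omega) (by omega)
      simp only [zero_add] at h2
      rw [h2]
      omega
    · simp only [List.foldl_cons, pvStepA, pvStepB, if_neg hc,
        if_neg (show ¬((0 : Int) ≠ 0) by simp), pvNZ_cons, if_pos hc]
      have : (1 + pvNZ l - 1 : Int) = pvNZ l := by omega
      rw [this]
      exact ih

-- ===== VERDICT (by name: the statement is the Claim_ definition above) =====
theorem secondsToRemoveOccurrences_spec : Claim_equal_secondsToRemoveOccurrences := by
  intro s _
  unfold Spec_secondsToRemoveOccurrences secondsToRemoveOccurrences secondsToRemoveOccurrences_alt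
  exact pvMain s.toList
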